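-- pv_equiv track=rewrite | github.com/Ethycs/structure_net | src/structure_net/components/orchestrators/adaptive_lr_orchestrator.py | _get_layer_index
-- ===== SOURCE A (Python) =====
-- def _get_layer_index(param_name: str) -> int:
--     """Extract layer index from parameter name."""
--     # Simple heuristic: count dots before 'weight' or 'bias'
--     parts = param_name.split('.')
--     layer_idx = 0
--     for i, part in enumerate(parts):
--         if part in ['weight', 'bias']:
--             break
--         if part.isdigit():
--             layer_idx = int(part)
--     return layer_idx
-- ===== SOURCE B (Python) =====
-- def _get_layer_index(param_name: str) -> int:
--     """Extract layer index from parameter name."""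
--     parts = param_name.split('.')
--     cutoff = next((i for i, p in enumerate(parts) if p in ('weight', 'bias')),
--                   len(parts))
--     for p in reversed(parts[:cutoff]):
--         if p.isdigit():
--             return int(p)
--     return 0
-- ===== Notes on version B (the rewrite author's own statement) =====
-- stated objective: alternative
-- what changed: A's forward pass that keeps overwriting a last-seen-digit accumulator until the weight/bias marker is replaced by first locating the cutoff index of the marker and then scanning the prefix backwards, returning at the first digit token.
import Mathlib
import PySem

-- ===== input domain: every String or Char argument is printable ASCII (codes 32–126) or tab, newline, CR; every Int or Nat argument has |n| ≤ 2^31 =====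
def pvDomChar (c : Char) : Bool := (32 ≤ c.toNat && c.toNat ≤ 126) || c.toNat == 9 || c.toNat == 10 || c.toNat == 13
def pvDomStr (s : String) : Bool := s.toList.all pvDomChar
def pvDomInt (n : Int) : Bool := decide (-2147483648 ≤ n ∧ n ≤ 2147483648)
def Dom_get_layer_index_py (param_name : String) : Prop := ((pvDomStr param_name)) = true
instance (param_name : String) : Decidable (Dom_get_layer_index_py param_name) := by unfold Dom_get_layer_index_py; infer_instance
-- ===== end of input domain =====

-- B replaces A's forward 'remember the last digit' accumulator loop by a cutoff search
-- followed by a backward scan of the prefix (alternative decomposition, same cost).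

-- ===== PORT A =====
-- the loop of A: break on 'weight'/'bias', otherwise overwrite the accumulator on digit parts
-- int(part) is exact here via ofStr?: part.isdigit() guarantees int(part) succeeds, the getD 0 is never taken
def pvALoop : List String → Int → Int
  | [], acc => acc
  | p :: rest, acc =>
    if p == "weight" || p == "bias" then acc
    else if PySem.Str.strIsdigit p then pvALoop rest ((PySem.Int.ofStr? p).getD 0)
    else pvALoop rest acc

def get_layer_index_py (param_name : String) : Int :=
  pvALoop ((PySem.Str.split? param_name ".").getD []) 0

-- ===== PORT B =====
-- cutoff = index of first 'weight'/'bias' part (len(parts) if none)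
def pvCutoff : List String → Nat
  | [] => 0
  | p :: rest => if p == "weight" || p == "bias" then 0 else pvCutoff rest + 1

-- the reversed-prefix scan: return at the first digit part, default 0
def pvBScan : List String → Int
  | [] => 0
  | p :: rest => if PySem.Str.strIsdigit p then (PySem.Int.ofStr? p).getD 0 else pvBScan rest

def get_layer_index_py_alt (param_name : String) : Int :=
  let parts := (PySem.Str.split? param_name ".").getD []
  pvBScan (List.take (pvCutoff parts) parts).reverse

-- ===== PRECONDITION & SPEC =====
def Spec_get_layer_index_py (param_name : String) (out : Int) : Prop := out = get_layer_index_py_alt param_name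
instance (param_name : String) (out : Int) : Decidable (Spec_get_layer_index_py param_name out) := by unfold Spec_get_layer_index_py; infer_instance

-- ===== CLAIM (what is proved, stated in full; the proofs are below) =====
def Claim_equal_get_layer_index_py : Prop := ∀ (param_name : String), Dom_get_layer_index_py param_name → Spec_get_layer_index_py param_name (get_layer_index_py param_name)

-- ===== LEMMAS AND PROOFS =====

-- the prefix before B's cutoff is exactly the takeWhile of non-marker parts
theorem take_cutoff_eq_takeWhile (l : List String) :
    List.take (pvCutoff l) l
      = List.takeWhile (fun p => !(p == "weight" || p == "bias")) l := by
  induction l with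
  | nil => rfl
  | cons p rest ih =>
    by_cases h : (p == "weight" || p == "bias") = true
    · simp [pvCutoff, List.takeWhile, h]
    · simp [pvCutoff, List.takeWhile, h, ih]

-- B's backward scan is find?-then-convert
theorem pvBScan_eq_find? (l : List String) :
    pvBScan l = ((l.find? (fun p => PySem.Str.strIsdigit p)).map
      (fun p => (PySem.Int.ofStr? p).getD 0)).getD 0 := by
  induction l with
  | nil => rfl
  | cons p rest ih =>
    by_cases h : PySem.Chars.strIsdigit p.toList = true
    · simp [pvBScan, List.find?, PySem.Str.strIsdigit_eq, h]
    · simp [pvBScan, List.find?, PySem.Str.strIsdigit_eq, h, ih]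

-- A's forward loop computes the last digit of the pre-marker prefix, i.e. the first one of its reverse
theorem pvALoop_eq (l : List String) (acc : Int) :
    pvALoop l acc
      = ((((List.takeWhile (fun p => !(p == "weight" || p == "bias")) l).reverse.find?
          (fun p => PySem.Str.strIsdigit p)).map
            (fun p => (PySem.Int.ofStr? p).getD 0)).getD acc) := by
  induction l generalizing acc with
  | nil => rfl
  | cons p rest ih =>
    by_cases hm : (p == "weight" || p == "bias") = true
    · simp [pvALoop, List.takeWhile, hm]
    · by_cases hd : PySem.Chars.strIsdigit p.toList = true
      · simp only [pvALoop, hm, PySem.Str.strIsdigit_eq, hd, List.takeWhile,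
          Bool.not_false, List.reverse_cons, List.find?_append, ih]
        cases hfind : (List.takeWhile (fun p => !(p == "weight" || p == "bias")) rest).reverse.find?
            (fun p => PySem.Str.strIsdigit p) with
        | none =>
          simp only [PySem.Str.strIsdigit_eq, Bool.not_or] at hfind
          simp [List.find?, hd, hfind]
        | some q =>
          simp only [PySem.Str.strIsdigit_eq, Bool.not_or] at hfind
          simp [List.find?, hd, hfind]
      · simp only [pvALoop, hm, PySem.Str.strIsdigit_eq, hd, List.takeWhile,
          Bool.not_false, List.reverse_cons, List.find?_append, ih]
        cases hfind : (List.takeWhile (fun p => !(p == "weight" || p == "bias")) rest).reverse.find?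
            (fun p => PySem.Str.strIsdigit p) with
        | none =>
          simp only [PySem.Str.strIsdigit_eq, Bool.not_or] at hfind
          simp [List.find?, hd, hfind]
        | some q =>
          simp only [PySem.Str.strIsdigit_eq, Bool.not_or] at hfind
          simp [List.find?, hd, hfind]

-- ===== VERDICT (by name: the statement is the Claim_ definition above) =====
theorem get_layer_index_py_spec : Claim_equal_get_layer_index_py := by
  intro param_name _
  unfold Spec_get_layer_index_py get_layer_index_py get_layer_index_py_alt
  simp only [take_cutoff_eq_takeWhile, pvBScan_eq_find?, pvALoop_eq]
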